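-- pv_equiv track=rewrite | github.com/Samaara-Das/Amplifier | scripts/utils/crypto.py | is_encrypted
-- ===== SOURCE A (Python) =====
-- def is_encrypted(value: str) -> bool:
--     """Check if a value looks like it was encrypted by this module."""
--     if not value or ":" not in value:
--         return False
--     parts = value.split(":", 1)
--     return (
--         len(parts) == 2
--         and len(parts[0]) == 32
--         and len(parts[1]) >= 32
--         and all(c in "0123456789abcdef" for c in parts[0])
--     )
-- ===== SOURCE B (Python) =====
-- _HEX = frozenset("0123456789abcdef")
--
-- def is_encrypted(value: str) -> bool:
--     """Check if a value looks like it was encrypted by this module."""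
--     # first ':' must sit exactly at index 32, preceded by 32 lowercase hex
--     # digits and followed by at least 32 characters: check by direct indexing,
--     # no split and no whole-string scan.
--     return (
--         len(value) >= 65
--         and value[32] == ":"
--         and all(c in _HEX for c in value[:32])
--     )
-- ===== Notes on version B (the rewrite author's own statement) =====
-- stated objective: simpler
-- what changed: Replaces the whole-string separator scan and split(sep, 1) with direct positional checks (length >= 65, the separator at index 32, hex test of the fixed 32-char prefix), so only the first 33 characters are examined.
import Mathlib
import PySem

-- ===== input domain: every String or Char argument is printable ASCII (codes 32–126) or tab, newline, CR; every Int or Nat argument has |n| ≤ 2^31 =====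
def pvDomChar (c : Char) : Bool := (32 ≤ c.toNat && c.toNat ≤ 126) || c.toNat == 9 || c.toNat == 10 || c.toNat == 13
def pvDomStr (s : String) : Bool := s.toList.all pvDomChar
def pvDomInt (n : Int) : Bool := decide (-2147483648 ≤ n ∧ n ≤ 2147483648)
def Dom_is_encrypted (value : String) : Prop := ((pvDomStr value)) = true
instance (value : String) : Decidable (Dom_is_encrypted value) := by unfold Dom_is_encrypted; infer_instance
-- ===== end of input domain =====

-- B checks the fixed positions directly (length, value[32], hex prefix) instead of A's
-- whole-string ':' scan and split(':', 1): only the first 33 characters are examined.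

-- ===== PORT A =====
def is_encrypted (value : String) : Bool :=
  let cs := value.toList
  if cs = [] ∨ PySem.Chars.isIn [':'] cs = false then false
  else
    let parts := PySem.Chars.splitOnMax cs [':'] 1
    decide (parts.length = 2) &&
    decide ((parts.getD 0 []).length = 32) &&
    decide (32 ≤ (parts.getD 1 []).length) &&
    (parts.getD 0 []).all (fun c => ("0123456789abcdef".toList).contains c)

-- ===== PORT B =====
def is_encrypted_alt (value : String) : Bool :=
  let cs := value.toList
  decide (65 ≤ cs.length) &&
  (PySem.List.pyGet? cs 32 == some ':') &&
  (PySem.List.slice cs none (some 32)).all (fun c => ("0123456789abcdef".toList).contains c)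

-- ===== PRECONDITION & SPEC =====
def Spec_is_encrypted (value : String) (out : Bool) : Prop := out = is_encrypted_alt value
instance (value : String) (out : Bool) : Decidable (Spec_is_encrypted value out) := by unfold Spec_is_encrypted; infer_instance

-- ===== CLAIM (what is proved, stated in full; the proofs are below) =====
def Claim_equal_is_encrypted : Prop := ∀ (value : String), Dom_is_encrypted value → Spec_is_encrypted value (is_encrypted value)

-- ===== LEMMAS AND PROOFS =====

-- splitOnMax.go with budget 0: the remainder becomes the final piece
theorem go_zero (fuel : Nat) (hf : 0 < fuel) (l cur : List Char) (acc : List (List Char)) :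
    PySem.Chars.splitOnMax.go [':'] fuel 0 l cur acc = ((cur.reverse ++ l) :: acc).reverse := by
  cases fuel with
  | zero => omega
  | succ f => cases l <;> simp [PySem.Chars.splitOnMax.go]

-- splitOnMax.go with budget 1: split at the first ':' if any
theorem go_one (fuel : Nat) : ∀ (l cur : List Char) (acc : List (List Char)), l.length < fuel →
    PySem.Chars.splitOnMax.go [':'] fuel 1 l cur acc =
      if ':' ∈ l then
        acc.reverse ++ [cur.reverse ++ l.takeWhile (· ≠ ':'), (l.dropWhile (· ≠ ':')).tail]
      else acc.reverse ++ [cur.reverse ++ l] := by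
  induction fuel with
  | zero => intro l cur acc h; omega
  | succ f ih =>
    intro l cur acc h
    cases l with
    | nil => simp [PySem.Chars.splitOnMax.go]
    | cons c rest =>
      by_cases hc : c = ':'
      · subst hc
        have hpre : List.isPrefixOf [':'] (':' :: rest) = true := by simp [List.isPrefixOf]
        simp only [PySem.Chars.splitOnMax.go, if_neg (by omega : ¬ (1 : Nat) = 0), hpre, if_pos]
        rw [go_zero f (by simp at h; omega)]
        simp [List.takeWhile, List.dropWhile]
      · have hpre : List.isPrefixOf [':'] (c :: rest) = false := by
          simp [List.isPrefixOf]; exact fun hh => (hc hh.symm).elim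
        simp only [PySem.Chars.splitOnMax.go, if_neg (by omega : ¬ (1 : Nat) = 0), hpre,
          Bool.false_eq_true, if_false]
        rw [ih rest (c :: cur) acc (by simp at h ⊢; omega)]
        by_cases hm : ':' ∈ rest <;>
          simp [hm, hc, Ne.symm hc]

-- the split A performs, characterised
theorem splitOnMax_colon (cs : List Char) :
    PySem.Chars.splitOnMax cs [':'] 1 =
      if ':' ∈ cs then [cs.takeWhile (· ≠ ':'), (cs.dropWhile (· ≠ ':')).tail]
      else [cs] := by
  unfold PySem.Chars.splitOnMax
  rw [if_neg (by omega : ¬ (1 : Int) < 0)]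
  have : ((1 : Int)).toNat = 1 := rfl
  rw [this, go_one (cs.length + 1) cs [] [] (by omega)]
  by_cases h : ':' ∈ cs <;> simp [h]

-- singleton substring test is membership
theorem isIn_singleton (cs : List Char) :
    PySem.Chars.isIn [':'] cs = true ↔ ':' ∈ cs := by
  rw [PySem.Chars.isIn_iff_infix]
  constructor
  · intro h
    exact List.singleton_sublist.mp h.sublist
  · intro h
    obtain ⟨pre, suf, rfl⟩ := List.append_of_mem h
    exact ⟨pre, suf, by simp⟩

theorem colon_not_hex (c : Char) (hc : ("0123456789abcdef".toList).contains c = true) : c ≠ ':' := by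
  intro h; subst h; revert hc; decide

theorem is_encrypted_spec' (value : String) :
    is_encrypted value = is_encrypted_alt value := by
  unfold is_encrypted is_encrypted_alt
  set cs := value.toList with hcs
  have hget32 : PySem.List.pyGet? cs 32 = cs[(32:Nat)]? := by
    have h := PySem.List.pyGet?_of_nonneg cs (i := 32) (by omega)
    simpa using h
  have hslice : PySem.List.slice cs none (some 32) = cs.take 32 := by
    have h := PySem.List.slice_to cs (b := 32) (by omega)
    simpa using h
  by_cases hmem : ':' ∈ cs
  · have hne : cs ≠ [] := by intro h; rw [h] at hmem; simp at hmem
    rw [if_neg (by simp [hne, isIn_singleton, hmem])]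
    rw [splitOnMax_colon, if_pos hmem]
    -- decompose cs at its first ':'
    have hdne : cs.dropWhile (· ≠ ':') ≠ [] := by
      intro h
      have := (List.dropWhile_eq_nil_iff).mp h
      simp at this
      exact this ':' hmem rfl
    obtain ⟨c, t, hdw⟩ : ∃ c t, cs.dropWhile (· ≠ ':') = c :: t := by
      cases hd : cs.dropWhile (· ≠ ':') with
      | nil => exact absurd hd hdne
      | cons c t => exact ⟨c, t, rfl⟩
    have hcc : c = ':' := by
      have := List.head_dropWhile_not (p := (· ≠ ':')) hdne
      simp only [hdw, List.head_cons] at this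
      simpa using this
    subst hcc
    set b := cs.takeWhile (· ≠ ':') with hbdef
    have hb : ∀ x ∈ b, x ≠ ':' := by
      intro x hx
      have := List.mem_takeWhile_imp hx
      simpa using this
    have hsplit : cs = b ++ ':' :: t := by
      conv_lhs => rw [← List.takeWhile_append_dropWhile (p := (· ≠ ':')) (l := cs)]
      rw [hdw]
    rw [hdw]
    simp only [List.getD_cons_zero, List.getD_cons_succ, List.length_cons, List.length_nil,
      List.tail_cons, hget32, hslice]
    rw [Bool.eq_iff_iff]
    simp only [Bool.and_eq_true, decide_eq_true_eq, List.all_eq_true, beq_iff_eq]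
    constructor
    · rintro ⟨⟨⟨-, hb32⟩, ha32⟩, hhex⟩
      have hlcs : cs.length = 33 + t.length := by rw [hsplit]; simp [hb32]; omega
      refine ⟨⟨by omega, ?_⟩, ?_⟩
      · rw [hsplit, ← hb32]
        simp
      · rw [hsplit, ← hb32, List.take_left]
        exact hhex
    · rintro ⟨⟨hlen, hget⟩, hhex⟩
      have hble : ¬ b.length < 32 := by
        intro hlt
        have hmemb : ':' ∈ cs.take 32 := by
          rw [hsplit, List.take_append]
          simp [List.take_of_length_le (le_of_lt hlt), List.take_cons (by omega : 0 < 32 - b.length)]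
        exact colon_not_hex ':' (hhex ':' hmemb) rfl
      have hbge : ¬ 32 < b.length := by
        intro hlt
        have hgb : cs[(32:Nat)]? = b[(32:Nat)]? := by
          rw [hsplit, List.getElem?_append_left hlt]
        rw [hgb] at hget
        exact hb ':' (List.mem_of_getElem? hget) rfl
      have hb32 : b.length = 32 := by omega
      have hlcs : cs.length = 33 + t.length := by rw [hsplit]; simp [hb32]; omega
      refine ⟨⟨⟨trivial, hb32⟩, by omega⟩, ?_⟩
      rw [hsplit, ← hb32, List.take_left] at hhex
      exact hhex
  · -- no ':' anywhere: A short-circuits to false, B's index test fails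
    rw [if_pos (by
      by_cases h : cs = []
      · exact Or.inl h
      · refine Or.inr ?_
        cases hin : PySem.Chars.isIn [':'] cs
        · rfl
        · exact absurd ((isIn_singleton cs).mp hin) hmem)]
    have hfalse : (PySem.List.pyGet? cs 32 == some ':') = false := by
      cases hg : PySem.List.pyGet? cs 32 with
      | none => rfl
      | some c =>
        have hcm := PySem.List.mem_of_pyGet?_eq_some cs hg
        simp only [beq_eq_false_iff_ne, ne_eq, Option.some.injEq]
        intro h; subst h; exact hmem hcm
    simp [hfalse]

-- ===== VERDICT (by name: the statement is the Claim_ definition above) =====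
theorem is_encrypted_spec : Claim_equal_is_encrypted := by
  intro value _
  unfold Spec_is_encrypted
  exact is_encrypted_spec' value
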